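-- pv_equiv track=rewrite | github.com/Scouterna/skojjt-v2 | scripts/migration/transform_data.py | _build_personnummer_remap
-- ===== SOURCE A (Python) =====
-- from typing import Any, Dict, List, Optional, Tuple
--
-- def _build_personnummer_remap(raw_persons: List[Dict]) -> Tuple[Dict[str, int], Dict[Tuple[str, str], int]]:
--     """Build a mapping from personnummer-as-ID → real Scoutnet member_no.
--
--     In the old v1 system, some scout groups used the personnummer
--     (12-digit YYYYMMDDNNNN or 8-digit YYYYMMDD) as the person ID
--     instead of the Scoutnet member number. We map these back to the
--     real person by matching against the personal_number field.
--     """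
--     # Exact personnummer -> member_no
--     pnr_to_id: Dict[str, int] = {}
--     for p in raw_persons:
--         pnr = p.get('personal_number')
--         mid = p.get('id')
--         if pnr and mid:
--             pnr_clean = str(pnr).replace('-', '')
--             pnr_to_id[pnr_clean] = int(mid)
--             if len(pnr_clean) >= 8:
--                 pnr_to_id[pnr_clean[:8]] = int(mid)
--
--     # (birth_date_prefix, scout_group_key) -> member_no for fuzzy matching
--     birth_group_to_id: Dict[Tuple[str, str], int] = {}
--     ambiguous: set[Tuple[str, str]] = set()
--     for p in raw_persons:
--         pnr = p.get('personal_number')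
--         mid = p.get('id')
--         sg = p.get('scout_group_id')
--         if pnr and mid and sg:
--             prefix = str(pnr).replace('-', '')[:8]
--             key = (prefix, str(sg))
--             if key in birth_group_to_id and birth_group_to_id[key] != int(mid):
--                 ambiguous.add(key)
--             birth_group_to_id[key] = int(mid)
--     for k in ambiguous:
--         del birth_group_to_id[k]
--
--     return pnr_to_id, birth_group_to_id
-- ===== SOURCE B (Python) =====
-- def _build_personnummer_remap(raw_persons):
--     # Single pass: accumulate the exact-map (key, value) pairs in a list and the
--     # member numbers per (birth prefix, scout group) in a dict of sets.
--     exact_pairs = []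
--     groups = {}
--     for p in raw_persons:
--         pnr = p.get('personal_number')
--         mid = p.get('id')
--         sg = p.get('scout_group_id')
--         if not (pnr and mid):
--             continue
--         clean = str(pnr).replace('-', '')
--         m = int(mid)
--         exact_pairs.append((clean, m))
--         if len(clean) >= 8:
--             exact_pairs.append((clean[:8], m))
--         if sg:
--             groups.setdefault((clean[:8], str(sg)), set()).add(m)
--     pnr_to_id = dict(exact_pairs)
--     birth_group_to_id = {k: v.pop() for k, v in groups.items() if len(v) == 1}
--     return pnr_to_id, birth_group_to_id
-- ===== Notes on version B (the rewrite author's own statement) =====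
-- stated objective: alternative
-- what changed: A's two separate loops (dict inserts; last-value dict plus an 'ambiguous' key set deleted afterwards) are replaced by one single pass that accumulates a flat (key, value) pair list turned into the exact dict by dict(), and a dict of member-number sets per (birth-prefix, scout-group) from which only singleton groups are kept.
import Mathlib
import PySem

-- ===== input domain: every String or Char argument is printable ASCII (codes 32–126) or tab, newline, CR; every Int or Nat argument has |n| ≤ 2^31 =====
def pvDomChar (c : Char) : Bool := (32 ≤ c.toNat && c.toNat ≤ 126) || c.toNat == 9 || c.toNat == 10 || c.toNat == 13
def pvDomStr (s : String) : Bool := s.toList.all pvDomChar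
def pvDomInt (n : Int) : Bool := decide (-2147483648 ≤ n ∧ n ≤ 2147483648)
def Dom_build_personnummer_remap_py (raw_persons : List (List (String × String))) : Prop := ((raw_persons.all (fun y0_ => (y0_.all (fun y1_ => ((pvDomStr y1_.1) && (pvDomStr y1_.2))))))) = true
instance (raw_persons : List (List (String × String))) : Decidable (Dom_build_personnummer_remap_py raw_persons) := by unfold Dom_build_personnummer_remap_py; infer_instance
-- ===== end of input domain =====

-- B replaces A's two loops (dict inserts; last-value dict + ambiguous-set + deferred delete) by a
-- single pass accumulating a flat pair list (turned into the exact dict by dict()) and a dict of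
-- member-number sets per (birth prefix, scout group), keeping only singleton groups (objective:
-- alternative). Equivalence is about the return value; neither version mutates its argument.

-- ===== PORT A =====
-- p.get(k) on the person dict (association list, first match)
def pvGet (p : List (String × String)) (k : String) : Option String :=
  (PySem.Dict.mk p).get? k

-- Python truthiness of `p.get(k)`: a present, non-empty string
def pvTruthy (o : Option String) : Bool := !(o.getD "").toList.isEmpty

-- int(mid); total form — Pre_ excludes the inputs where int() raises ValueError
def pvIntOf (s : String) : Int := (PySem.Int.ofStr? s).getD 0

-- str(pnr).replace('-', '')  (str() of a str is the identity)
def pvClean (pnr : String) : String := PySem.Str.replace pnr "-" ""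

-- s[:8]
def pvPrefix8 (s : String) : String := PySem.Str.slice s none (some 8)

-- A's first loop body: exact pnr -> member_no
def pvStep1 (d : PySem.Dict String Int) (p : List (String × String)) : PySem.Dict String Int :=
  let pnr := pvGet p "personal_number"
  let mid := pvGet p "id"
  if pvTruthy pnr && pvTruthy mid then
    let c := pvClean (pnr.getD "")
    let d1 := d.insert c (pvIntOf (mid.getD ""))
    if 8 ≤ PySem.Str.len c then d1.insert (pvPrefix8 c) (pvIntOf (mid.getD "")) else d1
  else d

-- A's second loop: the guard `if pnr and mid and sg:` with key = (str(pnr).replace('-','')[:8], str(sg))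
-- and value int(mid)
def pvEvent (p : List (String × String)) : Option ((String × String) × Int) :=
  let pnr := pvGet p "personal_number"
  let mid := pvGet p "id"
  let sg := pvGet p "scout_group_id"
  if pvTruthy pnr && pvTruthy mid && pvTruthy sg then
    some ((pvPrefix8 (pvClean (pnr.getD "")), sg.getD ""), pvIntOf (mid.getD ""))
  else none

-- A's second-loop body: record ambiguity against the old value, then overwrite
def pvStepA (st : PySem.Dict (String × String) Int × PySem.Set (String × String))
    (e : (String × String) × Int) :
    PySem.Dict (String × String) Int × PySem.Set (String × String) :=
  let amb := if st.1.contains e.1 && (st.1.getD e.1 0 != e.2) then st.2.add e.1 else st.2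
  (st.1.insert e.1 e.2, amb)

def build_personnummer_remap_py (raw_persons : List (List (String × String))) : (List (String × Int)) × (List (String × String × Int)) :=
  let pnr_to_id := raw_persons.foldl pvStep1 PySem.Dict.empty
  let st := raw_persons.foldl
    (fun st p => match pvEvent p with | none => st | some e => pvStepA st e)
    (PySem.Dict.empty, PySem.Set.empty)
  -- `for k in ambiguous: del birth_group_to_id[k]` (erasing a set of keys; result is order-independent)
  let birth := st.2.foldl (fun d k => d.erase k) st.1
  (pnr_to_id.items, birth.items.map (fun q => (q.1.1, q.1.2, q.2)))

-- ===== PORT B =====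
-- truthiness of an Optional[str] (the `pnr and mid` / `if sg:` tests of Source B)
def bTruthy (o : Option String) : Bool :=
  match o with
  | none => false
  | some s => s.toList != []

-- Source B's single loop body: extends the exact-pair list and the dict of member-number sets
def bStep (st : List (String × Int) × PySem.Dict (String × String) (PySem.Set Int))
    (p : List (String × String)) :
    List (String × Int) × PySem.Dict (String × String) (PySem.Set Int) :=
  let pnr := (PySem.Dict.mk p).get? "personal_number"
  let mid := (PySem.Dict.mk p).get? "id"
  let sg := (PySem.Dict.mk p).get? "scout_group_id"
  if !(bTruthy pnr && bTruthy mid) then st  -- `continue`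
  else
    let clean := PySem.Str.replace (pnr.getD "") "-" ""
    let m := (PySem.Int.ofStr? (mid.getD "")).getD 0
    let pairs := st.1 ++ ((clean, m) ::
      (if 8 ≤ PySem.Str.len clean then [(PySem.Str.slice clean none (some 8), m)] else []))
    let groups :=
      if bTruthy sg then
        -- groups.setdefault(key, set()).add(m)
        st.2.modify (PySem.Str.slice clean none (some 8), sg.getD "") PySem.Set.empty
          (fun s => s.add m)
      else st.2
    (pairs, groups)

def build_personnummer_remap_py_alt (raw_persons : List (List (String × String))) : (List (String × Int)) × (List (String × String × Int)) :=
  let st := raw_persons.foldl bStep ([], PySem.Dict.empty)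
  -- dict(exact_pairs): sequential insertion, last value wins, first-insertion key order
  let pnr_to_id := st.1.foldl (fun d q => d.insert q.1 q.2)
    (PySem.Dict.empty : PySem.Dict String Int)
  -- {k: v.pop() for k, v in groups.items() if len(v) == 1}: only singleton sets are read,
  -- so v.pop() is the set's unique element (no dependence on set iteration order)
  let birth := st.2.items.filterMap
    (fun q => if q.2.length = 1 then some (q.1.1, q.1.2, q.2.headD 0) else none)
  (pnr_to_id.items, birth)

-- ===== PRECONDITION & SPEC =====
-- Pre_ excludes exactly the inputs where A raises ValueError: a person whose truthy 'id' string
-- is not a valid Python int literal while 'personal_number' is truthy (A calls int(mid) there).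
def Pre_build_personnummer_remap_py (raw_persons : List (List (String × String))) : Prop :=
  ∀ p ∈ raw_persons, pvTruthy (pvGet p "personal_number") = true →
    pvTruthy (pvGet p "id") = true →
    (PySem.Int.ofStr? ((pvGet p "id").getD "")).isSome = true
instance (raw_persons : List (List (String × String))) : Decidable (Pre_build_personnummer_remap_py raw_persons) := by unfold Pre_build_personnummer_remap_py; infer_instance

def pvWitness_build_personnummer_remap_py : (List (List (String × String))) :=
  [[("personal_number", "19990101-1234"), ("id", "7"), ("scout_group_id", "g1")],
   [("personal_number", "19990101-5678"), ("id", "8"), ("scout_group_id", "g1")]]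

def Spec_build_personnummer_remap_py (raw_persons : List (List (String × String))) (out : (List (String × Int)) × (List (String × String × Int))) : Prop := out = build_personnummer_remap_py_alt raw_persons
instance (raw_persons : List (List (String × String))) (out : (List (String × Int)) × (List (String × String × Int))) : Decidable (Spec_build_personnummer_remap_py raw_persons out) := by unfold Spec_build_personnummer_remap_py; infer_instance

-- ===== CLAIM (what is proved, stated in full; the proofs are below) =====
def Claim_equal_build_personnummer_remap_py : Prop := ∀ (raw_persons : List (List (String × String))), Dom_build_personnummer_remap_py raw_persons → Pre_build_personnummer_remap_py raw_persons → Spec_build_personnummer_remap_py raw_persons (build_personnummer_remap_py raw_persons)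

-- ===== LEMMAS AND PROOFS =====

-- the two truthiness helpers agree
theorem pv_truthy_eq (o : Option String) : bTruthy o = pvTruthy o := by
  cases o with
  | none => rfl
  | some s => cases hs : s.toList <;> simp [bTruthy, pvTruthy, hs]

-- the exact-map pairs one person contributes
def pairsOf (p : List (String × String)) : List (String × Int) :=
  let pnr := pvGet p "personal_number"
  let mid := pvGet p "id"
  if pvTruthy pnr && pvTruthy mid then
    (pvClean (pnr.getD ""), pvIntOf (mid.getD "")) ::
      (if 8 ≤ PySem.Str.len (pvClean (pnr.getD "")) then
        [(pvPrefix8 (pvClean (pnr.getD "")), pvIntOf (mid.getD ""))] else [])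
  else []

-- A's second-loop body in grouped form (used only by the proofs)
def pvStepB (g : PySem.Dict (String × String) (PySem.Set Int))
    (e : (String × String) × Int) : PySem.Dict (String × String) (PySem.Set Int) :=
  g.modify e.1 PySem.Set.empty (fun s => s.add e.2)

def pvGroupStep (g : PySem.Dict (String × String) (PySem.Set Int))
    (p : List (String × String)) : PySem.Dict (String × String) (PySem.Set Int) :=
  match pvEvent p with | none => g | some e => pvStepB g e

-- one step of Source B's loop, componentwise
theorem bStep_eq (st : List (String × Int) × PySem.Dict (String × String) (PySem.Set Int))
    (p : List (String × String)) :
    bStep st p = (st.1 ++ pairsOf p, pvGroupStep st.2 p) := by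
  unfold bStep pairsOf pvGroupStep pvEvent pvGet pvClean pvIntOf pvPrefix8
  simp only [pv_truthy_eq]
  by_cases h1 : pvTruthy ((PySem.Dict.mk p).get? "personal_number") = true <;>
    by_cases h2 : pvTruthy ((PySem.Dict.mk p).get? "id") = true <;>
    by_cases h3 : pvTruthy ((PySem.Dict.mk p).get? "scout_group_id") = true <;>
    simp [h1, h2, h3, pvStepB]

-- Source B's fold, split into the pair list and the groups dict
theorem bFold (l : List (List (String × String)))
    (ps : List (String × Int)) (g : PySem.Dict (String × String) (PySem.Set Int)) :
    l.foldl bStep (ps, g) = (ps ++ l.flatMap pairsOf, l.foldl pvGroupStep g) := by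
  induction l generalizing ps g with
  | nil => simp
  | cons p l ih =>
    simp only [List.foldl_cons, List.flatMap_cons]
    rw [bStep_eq (ps, g) p]
    rw [ih]
    simp

-- A's first-loop body = inserting that person's pairs one by one
theorem pvStep1_eq (d : PySem.Dict String Int) (p : List (String × String)) :
    pvStep1 d p = (pairsOf p).foldl (fun d q => d.insert q.1 q.2) d := by
  unfold pvStep1 pairsOf
  by_cases h : (pvTruthy (pvGet p "personal_number") && pvTruthy (pvGet p "id")) = true
  · rw [if_pos h, if_pos h]
    by_cases hl : 8 ≤ PySem.Str.len (pvClean ((pvGet p "personal_number").getD ""))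
    · rw [if_pos hl, if_pos hl]; rfl
    · rw [if_neg hl, if_neg hl]; rfl
  · rw [if_neg h, if_neg h]; rfl

-- A's whole first loop = dict(exact_pairs)
theorem pvLoop1_eq (l : List (List (String × String))) (d : PySem.Dict String Int) :
    l.foldl pvStep1 d = (l.flatMap pairsOf).foldl (fun d q => d.insert q.1 q.2) d := by
  induction l generalizing d with
  | nil => rfl
  | cons p l ih =>
    simp only [List.foldl_cons, List.flatMap_cons, List.foldl_append]
    rw [pvStep1_eq, ih]

-- dispatching on `pvEvent` then folding = folding over the filterMap of the events
theorem pv_foldl_event {σ : Type} (f : σ → (String × String) × Int → σ)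
    (l : List (List (String × String))) (init : σ) :
    l.foldl (fun st p => match pvEvent p with | none => st | some e => f st e) init
      = (l.filterMap pvEvent).foldl f init := by
  induction l generalizing init with
  | nil => rfl
  | cons p l ih =>
    simp only [List.foldl_cons, List.filterMap_cons]
    cases pvEvent p <;> simp [ih]

-- a list containing two distinct elements has length ≥ 2
theorem pv_two_le_length {α : Type} {l : List α} {a b : α}
    (ha : a ∈ l) (hb : b ∈ l) (hne : a ≠ b) : 2 ≤ l.length := by
  cases l with
  | nil => simp at ha
  | cons x t =>
    cases t with
    | nil =>
      simp only [List.mem_singleton] at ha hb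
      exact absurd (ha.trans hb.symm) hne
    | cons y u => simp only [List.length_cons]; omega

-- the invariant tying A's (dict, ambiguous) state to B's groups state
def pvInv (d : PySem.Dict (String × String) Int) (amb : PySem.Set (String × String))
    (g : PySem.Dict (String × String) (PySem.Set Int)) : Prop :=
  d.keys = g.keys ∧ g.keys.Nodup ∧ (∀ k, k ∈ amb → k ∈ g.keys) ∧
  (∀ k, k ∈ g.keys →
    d.getD k 0 ∈ g.getD k PySem.Set.empty ∧
    (k ∈ amb ↔ 2 ≤ (g.getD k PySem.Set.empty).length) ∧
    ((g.getD k PySem.Set.empty).length = 1 → g.getD k PySem.Set.empty = [d.getD k 0]))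

theorem pvInv_step (d : PySem.Dict (String × String) Int) (amb : PySem.Set (String × String))
    (g : PySem.Dict (String × String) (PySem.Set Int)) (e : (String × String) × Int)
    (h : pvInv d amb g) : pvInv (pvStepA (d, amb) e).1 (pvStepA (d, amb) e).2 (pvStepB g e) := by
  obtain ⟨hkeys, hnd, hamb, hpt⟩ := h
  obtain ⟨k, v⟩ := e
  have hcont : d.contains k = g.contains k := by
    by_cases hk : k ∈ g.keys
    · rw [(PySem.Dict.contains_iff_mem_keys d k).2 (hkeys ▸ hk),
        (PySem.Dict.contains_iff_mem_keys g k).2 hk]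
    · have h1 : d.contains k = false := by
        rw [← Bool.not_eq_true]; intro hc
        exact hk (hkeys ▸ (PySem.Dict.contains_iff_mem_keys d k).1 hc)
      have h2 : g.contains k = false := by
        rw [← Bool.not_eq_true]; intro hc
        exact hk ((PySem.Dict.contains_iff_mem_keys g k).1 hc)
      rw [h1, h2]
  simp only [pvStepA, pvStepB, PySem.Dict.modify]
  refine ⟨?_, ?_, ?_, ?_⟩
  · -- keys agree
    by_cases hc : g.contains k = true
    · rw [PySem.Dict.keys_insert_of_contains d v (hcont ▸ hc),
        PySem.Dict.keys_insert_of_contains g _ hc, hkeys]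
    · rw [PySem.Dict.keys_insert_of_not_contains d v (by rw [hcont]; simpa using hc),
        PySem.Dict.keys_insert_of_not_contains g _ (by simpa using hc), hkeys]
  · exact PySem.Dict.nodup_keys_insert g _ _ hnd
  · -- new ambiguous keys are keys of the new groups dict
    intro j hj
    rw [PySem.Dict.mem_keys_insert]
    split at hj
    · rcases (PySem.Set.mem_add amb k j).1 hj with hj' | hj'
      · exact Or.inr (hamb j hj')
      · exact Or.inl hj'
    · exact Or.inr (hamb j hj)
  · -- pointwise facts
    intro j hj
    rw [PySem.Dict.mem_keys_insert] at hj
    by_cases hjk : j = k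
    · subst hjk
      have hd' : (d.insert j v).getD j 0 = v := by
        rw [PySem.Dict.getD_insert]; simp
      have hg' : (g.insert j ((g.getD j PySem.Set.empty).add v)).getD j PySem.Set.empty
          = (g.getD j PySem.Set.empty).add v := by
        rw [PySem.Dict.getD_insert]; simp
      rw [hd', hg']
      by_cases hck : g.contains j = true
      · have hkmem : j ∈ g.keys := (PySem.Dict.contains_iff_mem_keys g j).1 hck
        obtain ⟨hmem, hiff, hsing⟩ := hpt j hkmem
        by_cases hv : d.getD j 0 = v
        · -- re-inserting the current value: nothing changes
          have hin : (g.getD j PySem.Set.empty).contains v = true :=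
            List.contains_iff_mem.2 (hv ▸ hmem)
          have hadd : (g.getD j PySem.Set.empty).add v = g.getD j PySem.Set.empty := by
            simp only [PySem.Set.add, hin, if_pos]
          have hcond : ¬ ((d.contains j && (d.getD j 0 != v)) = true) := by simp [hv]
          rw [hadd, if_neg hcond]
          exact ⟨hv ▸ hmem, hiff, fun hl => by rw [hsing hl, hv]⟩
        · -- a conflicting value: the key becomes ambiguous, the group gains a 2nd element
          have hcond : (d.contains j && (d.getD j 0 != v)) = true := by
            simp [hcont, hck, hv]
          rw [if_pos hcond]
          have hv1 : v ∈ (g.getD j PySem.Set.empty).add v :=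
            (PySem.Set.mem_add _ _ _).2 (Or.inr rfl)
          have hv2 : d.getD j 0 ∈ (g.getD j PySem.Set.empty).add v :=
            (PySem.Set.mem_add _ _ _).2 (Or.inl hmem)
          have h2 : 2 ≤ ((g.getD j PySem.Set.empty).add v).length :=
            pv_two_le_length hv2 hv1 hv
          refine ⟨hv1, ⟨fun _ => h2, fun _ => (PySem.Set.mem_add _ _ _).2 (Or.inr rfl)⟩, ?_⟩
          intro hl; omega
      · -- first time this key is seen
        have hdck : d.contains j = false := by rw [hcont]; simpa using hck
        have hempty : g.getD j PySem.Set.empty = PySem.Set.empty :=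
          PySem.Dict.getD_of_not_contains g _ (by simpa using hck)
        have hadd : ((g.getD j PySem.Set.empty)).add v = [v] := by
          rw [hempty]; simp [PySem.Set.add, PySem.Set.empty]
        have hcond : ¬ ((d.contains j && (d.getD j 0 != v)) = true) := by simp [hdck]
        rw [hadd, if_neg hcond]
        have hnamb : j ∉ amb := fun hja =>
          (by simpa using hck : ¬ g.contains j = true)
            ((PySem.Dict.contains_iff_mem_keys g j).2 (hamb j hja))
        exact ⟨by simp, ⟨fun hja => absurd hja hnamb, by simp⟩, fun _ => rfl⟩
    · -- an untouched key
      have hj' : j ∈ g.keys := hj.resolve_left hjk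
      obtain ⟨hmem, hiff, hsing⟩ := hpt j hj'
      have hd' : (d.insert k v).getD j 0 = d.getD j 0 := by
        rw [PySem.Dict.getD_insert, if_neg hjk]
      have hg' : (g.insert k ((g.getD k PySem.Set.empty).add v)).getD j PySem.Set.empty
          = g.getD j PySem.Set.empty := by
        rw [PySem.Dict.getD_insert, if_neg hjk]
      rw [hd', hg']
      have hambeq : (j ∈ (if (d.contains k && (d.getD k 0 != v)) = true then amb.add k else amb)) ↔ j ∈ amb := by
        split
        · rw [PySem.Set.mem_add]
          exact ⟨fun h => h.resolve_right hjk, Or.inl⟩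
        · exact Iff.rfl
      exact ⟨hmem, hambeq.trans hiff, hsing⟩

theorem pvInv_foldl (L : List ((String × String) × Int))
    (d : PySem.Dict (String × String) Int) (amb : PySem.Set (String × String))
    (g : PySem.Dict (String × String) (PySem.Set Int)) (h : pvInv d amb g) :
    pvInv (L.foldl pvStepA (d, amb)).1 (L.foldl pvStepA (d, amb)).2 (L.foldl pvStepB g) := by
  induction L generalizing d amb g with
  | nil => exact h
  | cons e L ih =>
    simp only [List.foldl_cons]
    have := ih (pvStepA (d, amb) e).1 (pvStepA (d, amb) e).2 (pvStepB g e) (pvInv_step d amb g e h)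
    simpa using this

-- deleting a set of keys = filtering the items list
theorem pv_items_eraseFold (L : List (String × String)) (d : PySem.Dict (String × String) Int) :
    (L.foldl (fun d k => d.erase k) d).items = d.items.filter (fun p => !L.contains p.1) := by
  induction L generalizing d with
  | nil => simp
  | cons k L ih =>
    rw [List.foldl_cons, ih]
    have he : (d.erase k).items = d.items.filter (fun p => !(p.1 == k)) := rfl
    rw [he, List.filter_filter]
    apply List.filter_congr
    intro a _
    simp only [List.contains_cons, Bool.not_or]
    rw [Bool.and_comm]

-- pointwise: dropping ambiguous keys = keeping singleton groups
theorem pv_keys_agree (keys : List (String × String)) (amb : PySem.Set (String × String))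
    (dval : (String × String) → Int) (gval : (String × String) → PySem.Set Int)
    (H : ∀ k ∈ keys, dval k ∈ gval k ∧ (k ∈ amb ↔ 2 ≤ (gval k).length) ∧
      ((gval k).length = 1 → gval k = [dval k])) :
    (keys.filter (fun k => !amb.contains k)).map (fun k => (k.1, k.2, dval k))
      = keys.filterMap (fun k => if (gval k).length = 1 then some (k.1, k.2, (gval k).headD 0) else none) := by
  induction keys with
  | nil => rfl
  | cons k t ih =>
    obtain ⟨hmem, hiff, hsing⟩ := H k List.mem_cons_self
    have ht := fun k hk => H k (List.mem_cons_of_mem _ hk)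
    rw [List.filter_cons, List.filterMap_cons]
    by_cases hl : (gval k).length = 1
    · have hna : k ∉ amb := fun ha => by have := hiff.1 ha; omega
      have hnc : (!amb.contains k) = true := by simp [hna]
      rw [if_pos hnc, if_pos hl, List.map_cons, ih ht]
      have hhead : (gval k).headD 0 = dval k := by rw [hsing hl]; rfl
      rw [hhead]
    · have hge : 1 ≤ (gval k).length := List.length_pos_of_mem hmem
      have ha : k ∈ amb := hiff.2 (by omega)
      rw [if_neg (by simp [ha]), if_neg hl, ih ht]

-- the final assembly: A's delete-the-ambiguous dict = B's singleton-group comprehension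
theorem pv_final (d : PySem.Dict (String × String) Int) (amb : PySem.Set (String × String))
    (g : PySem.Dict (String × String) (PySem.Set Int)) (h : pvInv d amb g) :
    (amb.foldl (fun d k => d.erase k) d).items.map (fun q => (q.1.1, q.1.2, q.2))
      = g.items.filterMap (fun q => if q.2.length = 1 then some (q.1.1, q.1.2, q.2.headD 0) else none) := by
  obtain ⟨hkeys, hnd, hamb, hpt⟩ := h
  rw [pv_items_eraseFold,
    PySem.Dict.items_eq_map_keys d (by rw [hkeys]; exact hnd) 0,
    PySem.Dict.items_eq_map_keys g hnd PySem.Set.empty,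
    hkeys, List.filter_map, List.map_map, List.filterMap_map]
  have := pv_keys_agree g.keys amb (fun k => d.getD k 0) (fun k => g.getD k PySem.Set.empty) hpt
  simpa [Function.comp] using this

-- ===== VERDICT (by name: the statement is the Claim_ definition above) =====
theorem build_personnummer_remap_py_spec : Claim_equal_build_personnummer_remap_py := by
  intro raw _ _
  unfold Spec_build_personnummer_remap_py build_personnummer_remap_py build_personnummer_remap_py_alt
  simp only
  rw [bFold]
  simp only
  refine Prod.ext ?_ ?_
  · simp only
    rw [pvLoop1_eq, List.nil_append]
  · simp only
    have hA : raw.foldl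
        (fun st p => match pvEvent p with | none => st | some e => pvStepA st e)
        ((PySem.Dict.empty : PySem.Dict (String × String) Int), (PySem.Set.empty : PySem.Set (String × String)))
        = (raw.filterMap pvEvent).foldl pvStepA (PySem.Dict.empty, PySem.Set.empty) :=
      pv_foldl_event pvStepA raw _
    have hB : raw.foldl pvGroupStep (PySem.Dict.empty : PySem.Dict (String × String) (PySem.Set Int))
        = (raw.filterMap pvEvent).foldl pvStepB PySem.Dict.empty := by
      unfold pvGroupStep
      exact pv_foldl_event pvStepB raw _
    rw [hA, hB]
    have hinv : pvInv (PySem.Dict.empty) (PySem.Set.empty) (PySem.Dict.empty) := by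
      refine ⟨by simp [PySem.Dict.keys_empty], by simp [PySem.Dict.keys_empty], ?_, ?_⟩
      · intro k hk; simp [PySem.Set.empty] at hk
      · intro k hk; simp [PySem.Dict.keys_empty] at hk
    exact pv_final _ _ _ (pvInv_foldl (raw.filterMap pvEvent) _ _ _ hinv)
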